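-- pv_equiv track=rewrite | github.com/MatLaft/exercicio_grafos | A3/coloracao.py | soma_binaria_restrita
-- ===== SOURCE A (Python) =====
-- def soma_binaria_restrita(casas_validas: list, soma_valor_decimal):
--     soma_binario = [int(i) for i in list((bin(soma_valor_decimal)[2:]))]
--     index_validos = [i for i, j in enumerate(casas_validas) if j]
--     soma = [0]*len(casas_validas)
--     for _ in range(soma_valor_decimal):
--         index_para_somar = -1
--         soma[index_validos[index_para_somar]] += 1
--         while 2 in soma:
--             soma[index_validos[index_para_somar]] = 0
--             index_para_somar -= 1
--             soma[index_validos[index_para_somar]] += 1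
--     return soma
-- ===== SOURCE B (Python) =====
-- def soma_binaria_restrita(casas_validas: list, soma_valor_decimal):
--     # place the binary digits of the value directly onto the valid positions, from the right
--     soma = [0] * len(casas_validas)
--     if soma_valor_decimal == 0:
--         return soma
--     digitos = [int(d) for d in bin(soma_valor_decimal)[2:]]
--     restantes = [i for i, j in enumerate(casas_validas) if j]
--     for digito in reversed(digitos):
--         soma[restantes.pop()] = digito
--     return soma
-- ===== Notes on version B (the rewrite author's own statement) =====
-- stated objective: faster
-- what changed: A counts up to the value by performing soma_valor_decimal successive binary increments with carry over the valid cells; B converts the value to its binary digits once and places them directly onto the valid positions popped from the right.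
import Mathlib
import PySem

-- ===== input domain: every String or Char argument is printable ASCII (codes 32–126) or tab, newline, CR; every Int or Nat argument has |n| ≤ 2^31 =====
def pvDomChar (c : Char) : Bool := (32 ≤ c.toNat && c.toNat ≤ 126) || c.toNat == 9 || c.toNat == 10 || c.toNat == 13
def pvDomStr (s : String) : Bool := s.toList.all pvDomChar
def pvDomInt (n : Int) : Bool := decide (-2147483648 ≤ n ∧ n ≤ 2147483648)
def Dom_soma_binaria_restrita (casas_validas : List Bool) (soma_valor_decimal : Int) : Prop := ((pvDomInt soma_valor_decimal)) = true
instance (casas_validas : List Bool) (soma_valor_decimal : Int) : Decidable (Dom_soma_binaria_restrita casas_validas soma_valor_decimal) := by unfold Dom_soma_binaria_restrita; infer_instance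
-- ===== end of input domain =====

-- B replaces A's unary counting loop (soma_valor_decimal binary increments) by one right-to-left
-- pass that assigns the value's binary digits directly to the valid positions: objective 'faster'.

-- ===== PORT A =====
-- the carry while-loop: 'while 2 in soma: soma[iv[k]] = 0; k -= 1; soma[iv[k]] += 1'.
-- fuel (= iv.length + 1) strictly exceeds the loop's possible trip count, so the fuel-0 branch is
-- unreachable; a 'none' from pyGet? is Python's IndexError (excluded by Pre_).
def carryA (iv : List Int) : Nat → Int → List Int → List Int
  | 0, _, soma => soma
  | fuel+1, k, soma =>
    if soma.contains 2 then
      match PySem.List.pyGet? iv k with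
      | none => soma
      | some p =>
        let soma1 := soma.set p.toNat 0
        match PySem.List.pyGet? iv (k-1) with
        | none => soma1
        | some q => carryA iv fuel (k-1) (soma1.set q.toNat (soma1.getD q.toNat 0 + 1))
    else soma

-- one iteration of 'for _ in range(soma_valor_decimal)': index_para_somar = -1; soma[iv[-1]] += 1; carry
def stepA (iv : List Int) (soma : List Int) : List Int :=
  match PySem.List.pyGet? iv (-1) with
  | none => soma
  | some p => carryA iv (iv.length + 1) (-1) (soma.set p.toNat (soma.getD p.toNat 0 + 1))

-- NOTE: A's local 'soma_binario' is dead code (never read); for negative input it is where Python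
-- raises ValueError (int('b')) — those inputs are excluded by Pre_, so it is omitted here.
def soma_binaria_restrita (casas_validas : List Bool) (soma_valor_decimal : Int) : List Int :=
  let index_validos : List Int :=
    (PySem.List.enumerate casas_validas).filterMap (fun ij => if ij.2 then some ij.1 else none)
  (List.range soma_valor_decimal.toNat).foldl
    (fun soma _ => stepA index_validos soma)
    (List.replicate casas_validas.length 0)

-- ===== PORT B =====
-- hand port of '[int(d) for d in bin(v)[2:]]' (bin has no PySem primitive): the binary digits of a
-- POSITIVE v, most significant first — exact there; B only evaluates it for v ≠ 0, and for v < 0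
-- the Python raises ValueError (excluded by Pre_)
def binDigits : Nat → List Int
  | 0 => []
  | v + 1 => binDigits ((v + 1) / 2) ++ [(((v + 1) % 2 : Nat) : Int)]
decreasing_by omega

def soma_binaria_restrita_alt (casas_validas : List Bool) (soma_valor_decimal : Int) : List Int :=
  let soma := List.replicate casas_validas.length (0 : Int)
  if soma_valor_decimal = 0 then soma
  else
    let digitos := binDigits soma_valor_decimal.toNat
    let restantes : List Int :=
      (PySem.List.enumerate casas_validas).filterMap (fun ij => if ij.2 then some ij.1 else none)
    (digitos.reverse.foldl
      (fun (st : List Int × List Int) digito =>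
        match PySem.List.pop? st.2 with
        | none => st   -- 'pop from empty list' IndexError: outside Pre_
        | some (p, rest) => (st.1.set p.toNat digito, rest))
      (soma, restantes)).1

-- ===== PRECONDITION & SPEC =====
-- Pre_ is exactly A's return domain: for negative input A raises ValueError (int over bin's '-'),
-- and for soma_valor_decimal ≥ 2^(number of valid positions) the carry runs off the left end of
-- index_validos and A raises IndexError.
def Pre_soma_binaria_restrita (casas_validas : List Bool) (soma_valor_decimal : Int) : Prop :=
  0 ≤ soma_valor_decimal ∧ soma_valor_decimal < (2 : Int) ^ (casas_validas.count true)
instance (casas_validas : List Bool) (soma_valor_decimal : Int) : Decidable (Pre_soma_binaria_restrita casas_validas soma_valor_decimal) := by unfold Pre_soma_binaria_restrita; infer_instance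
def pvWitness_soma_binaria_restrita : List Bool × Int := ([true, false, true, true], 5)

def Spec_soma_binaria_restrita (casas_validas : List Bool) (soma_valor_decimal : Int) (out : List Int) : Prop := out = soma_binaria_restrita_alt casas_validas soma_valor_decimal
instance (casas_validas : List Bool) (soma_valor_decimal : Int) (out : List Int) : Decidable (Spec_soma_binaria_restrita casas_validas soma_valor_decimal out) := by unfold Spec_soma_binaria_restrita; infer_instance

-- ===== CLAIM (what is proved, stated in full; the proofs are below) =====
def Claim_equal_soma_binaria_restrita : Prop := ∀ (casas_validas : List Bool) (soma_valor_decimal : Int), Dom_soma_binaria_restrita casas_validas soma_valor_decimal → Pre_soma_binaria_restrita casas_validas soma_valor_decimal → Spec_soma_binaria_restrita casas_validas soma_valor_decimal (soma_binaria_restrita casas_validas soma_valor_decimal)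

-- ===== LEMMAS AND PROOFS =====

-- binary digits of t written onto the TRUE slots of r (r is the reversed mask, low bit first)
def encN : List Bool → Nat → List Int
  | [], _ => []
  | true :: r, t => ((t % 2 : Nat) : Int) :: encN r (t / 2)
  | false :: r, t => 0 :: encN r t

-- binDigits read least-significant-digit first
def lsbRec : Nat → List Int
  | 0 => []
  | v + 1 => (((v + 1) % 2 : Nat) : Int) :: lsbRec ((v + 1) / 2)
decreasing_by omega

-- abstract form of B's placement loop: digits (LSB first) onto positions from the right
def rplace : List Int → List Nat → List Int → List Int
  | [], _, s => s
  | _ :: _, [], s => s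
  | d :: ds, p :: ps, s => rplace ds ps (s.set p d)

-- positions of the TRUE slots of the reversed mask, counted from the right
def rIdx : List Bool → List Nat
  | [] => []
  | true :: r => 0 :: (rIdx r).map (· + 1)
  | false :: r => (rIdx r).map (· + 1)

-- abstract form of carryA, working on the reversed list at positions from the right
def rcarry : List Nat → Nat → List Int → List Int
  | [], p, s => if s.contains 2 then s.set p 0 else s
  | q :: rest, p, s =>
    if s.contains 2 then rcarry rest q ((s.set p 0).set q ((s.set p 0).getD q 0 + 1))
    else s

theorem length_encN (r : List Bool) : ∀ t, (encN r t).length = r.length := by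
  induction r with
  | nil => intro t; rfl
  | cons b r ih => intro t; cases b <;> simp [encN, ih]

theorem mem_encN (r : List Bool) : ∀ t x, x ∈ encN r t → x = 0 ∨ x = 1 := by
  induction r with
  | nil => intro t x hx; simp [encN] at hx
  | cons b r ih =>
    intro t x hx
    cases b <;> simp [encN] at hx
    · rcases hx with h | h
      · exact Or.inl h
      · exact ih _ _ h
    · rcases hx with h | h
      · subst h; omega
      · exact ih _ _ h

theorem encN_zero (r : List Bool) : encN r 0 = List.replicate r.length 0 := by
  induction r with
  | nil => rfl
  | cons b r ih => cases b <;> simp [encN, ih, List.replicate_succ]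

theorem binDigits_reverse (t : Nat) : (binDigits t).reverse = lsbRec t := by
  induction t using Nat.strong_induction_on with
  | _ t ih =>
    match t with
    | 0 => simp [binDigits, lsbRec]
    | v + 1 =>
      rw [binDigits, lsbRec, List.reverse_append, List.reverse_singleton]
      rw [ih ((v + 1) / 2) (by omega)]
      rfl

theorem rIdx_lt (r : List Bool) : ∀ q ∈ rIdx r, q < r.length := by
  induction r with
  | nil => intro q hq; simp [rIdx] at hq
  | cons b r ih =>
    intro q hq
    cases b <;> simp [rIdx] at hq
    · rcases hq with ⟨a, ha, rfl⟩
      have := ih a ha; simp; omega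
    · rcases hq with rfl | ⟨a, ha, rfl⟩
      · simp
      · have := ih a ha; simp; omega

theorem rIdx_append_singleton (l : List Bool) (b : Bool) :
    rIdx (l ++ [b]) = rIdx l ++ (if b then [l.length] else []) := by
  induction l with
  | nil => cases b <;> rfl
  | cons x l ih =>
    cases x <;> cases b <;> simp [rIdx, ih]

theorem enumerate_shift {α : Type} (l : List α) : ∀ s : Int,
    PySem.List.enumerate l s = (PySem.List.enumerate l 0).map (fun p => (p.1 + s, p.2)) := by
  induction l with
  | nil => intro s; simp [PySem.List.enumerate_nil]
  | cons x l ih =>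
    intro s
    rw [PySem.List.enumerate_cons, PySem.List.enumerate_cons, ih (s+1), ih (0+1)]
    simp only [List.map_map, List.map_cons, List.cons.injEq, Function.comp]
    refine ⟨by simp, ?_⟩
    apply List.map_congr_left; intro p _; simp; omega

-- A's index_validos, described through rIdx of the reversed mask
theorem validIdx_eq (cv : List Bool) :
    (PySem.List.enumerate cv).filterMap (fun ij => if ij.2 then some ij.1 else none)
      = ((rIdx cv.reverse).map (fun q => ((cv.length - 1 - q : Nat) : Int))).reverse := by
  induction cv with
  | nil => rfl
  | cons b cv ih =>
    rw [PySem.List.enumerate_cons, enumerate_shift cv (0+1)]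
    have hmem : ∀ q ∈ rIdx cv.reverse, q < cv.length := by
      intro q hq; have := rIdx_lt cv.reverse q hq; simpa using this
    have hfm : List.filterMap (fun x => if x.2 = true then some (x.1 + 1) else none)
          (PySem.List.enumerate cv)
        = List.map (fun x => x + 1)
            (List.filterMap (fun ij => if ij.2 = true then some ij.1 else none)
              (PySem.List.enumerate cv)) := by
      rw [List.map_filterMap]
      apply List.filterMap_congr
      intro p _
      by_cases hp : p.2 <;> simp [hp]
    have hmap : List.map (fun q => ((cv.length - q : Nat) : Int)) (rIdx cv.reverse)
        = List.map (fun x => x + 1)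
            (List.map (fun q => ((cv.length - 1 - q : Nat) : Int)) (rIdx cv.reverse)) := by
      rw [List.map_map]
      apply List.map_congr_left
      intro q hq
      have := hmem q hq
      simp
      omega
    cases b <;>
      simp [List.filterMap_cons, List.filterMap_map, rIdx_append_singleton,
        hfm, hmap, ih, List.map_reverse]

theorem set_reverse {α : Type} (l : List α) (m : Nat) (x : α) (h : m < l.length) :
    l.reverse.set (l.length - 1 - m) x = (l.set m x).reverse := by
  apply List.ext_getElem (by simp)
  intro i h1 h2
  simp only [List.length_set, List.length_reverse] at h1 h2
  simp only [List.getElem_set, List.getElem_reverse, List.length_set, List.length_reverse]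
  split_ifs <;> first | rfl | omega

theorem getD_reverse (l : List Int) (m : Nat) (h : m < l.length) :
    l.reverse.getD (l.length - 1 - m) 0 = l.getD m 0 := by
  rw [List.getD_eq_getElem?_getD, List.getD_eq_getElem?_getD,
    List.getElem?_reverse (by omega)]
  congr 2
  omega

theorem contains_reverse (l : List Int) : l.reverse.contains 2 = l.contains 2 := by
  simp

-- pyGet? on the reversed-mapped index list: element j from the right
theorem iv_get (rl : List Nat) (f : Nat → Int) (j : Nat) (hj : j < rl.length) :
    PySem.List.pyGet? ((rl.map f).reverse) (-(j + 1 : Nat)) = some (f rl[j]) := by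
  rw [PySem.List.pyGet?_neg_natCast _ (j+1) (by omega) (by simp; omega)]
  simp only [List.length_reverse, List.length_map]
  rw [List.getElem?_reverse (by simp; omega)]
  have : (rl.map f).length - 1 - (rl.length - (j + 1)) = j := by simp; omega
  rw [this, List.getElem?_map, List.getElem?_eq_getElem hj]
  rfl

theorem pyGet?_neg_none {α : Type} (xs : List α) (k : Int) (h : k < -(xs.length : Int)) :
    PySem.List.pyGet? xs k = none := by
  simp only [PySem.List.pyGet?, PySem.List.pyIdx?]
  have h1 : ¬ (0 ≤ k) := by omega
  have h2 : ¬ (-(xs.length : Int) ≤ k) := by omega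
  simp [h1, h2]

-- moving rcarry across a cons (all working positions shifted by one)
theorem rcarry_shift (idxs : List Nat) : ∀ (p : Nat) (x : Int) (s : List Int), x ≠ 2 →
    rcarry (idxs.map (· + 1)) (p + 1) (x :: s) = x :: rcarry idxs p s := by
  induction idxs with
  | nil =>
    intro p x s hx
    have h2x : (2 == x) = false := beq_eq_false_iff_ne.mpr (fun h => hx h.symm)
    simp only [List.map_nil, rcarry, List.contains_cons, h2x, Bool.false_or,
      List.set_cons_succ]
    split_ifs <;> rfl
  | cons q rest ih =>
    intro p x s hx
    have h2x : (2 == x) = false := beq_eq_false_iff_ne.mpr (fun h => hx h.symm)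
    simp only [List.map_cons, rcarry, List.contains_cons, h2x, Bool.false_or,
      List.set_cons_succ, List.getD_cons_succ]
    split_ifs with h
    · exact ih q x _ hx
    · rfl

theorem encN_not_mem (r : List Bool) (t : Nat) : (2 : Int) ∉ encN r t := by
  intro hm
  rcases mem_encN r t 2 hm with h | h <;> norm_num at h

theorem rcarry_no2 (idxs : List Nat) (p : Nat) (s : List Int)
    (h : s.contains 2 = false) : rcarry idxs p s = s := by
  have hm : (2 : Int) ∉ s := by
    rw [List.contains_eq_mem, decide_eq_false_iff_not] at h
    exact h
  cases idxs <;> simp [rcarry, hm]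

-- binary-increment correctness of the carry chain, on the reversed mask
theorem rstep_correct (r : List Bool) : ∀ t : Nat, t + 1 < 2 ^ (r.count true) →
    ∃ p rest, rIdx r = p :: rest ∧
      rcarry rest p ((encN r t).set p ((encN r t).getD p 0 + 1)) = encN r (t + 1) := by
  induction r with
  | nil => intro t h; simp at h
  | cons b r ih =>
    intro t h
    cases b with
    | false =>
      have hc : t + 1 < 2 ^ (r.count true) := by
        simpa [List.count_cons] using h
      obtain ⟨p, rest, hE, hC⟩ := ih t hc
      refine ⟨p + 1, rest.map (· + 1), by simp [rIdx, hE], ?_⟩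
      simp only [encN, List.set_cons_succ, List.getD_cons_succ]
      rw [rcarry_shift rest p 0 _ (by norm_num)]
      exact congrArg (fun l => (0 : Int) :: l) hC
    | true =>
      rcases Nat.mod_two_eq_zero_or_one t with hpar | hpar
      · -- even: the incremented cell becomes 1, no carry
        refine ⟨0, (rIdx r).map (· + 1), rfl, ?_⟩
        simp only [encN, List.set_cons_zero, List.getD_cons_zero, hpar]
        rw [rcarry_no2 _ _ _ (by
          rw [List.contains_eq_mem, decide_eq_false_iff_not]
          simp [encN_not_mem r (t / 2)])]
        have h1 : (t + 1) % 2 = 1 := by omega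
        have h2 : (t + 1) / 2 = t / 2 := by omega
        simp [h1, h2]
      · -- odd: the incremented cell becomes 2 and the carry propagates
        have hcr : t / 2 + 1 < 2 ^ (r.count true) := by
          have hpow : 2 ^ ((true :: r).count true) = 2 * 2 ^ (r.count true) := by
            simp [List.count_cons, pow_succ, Nat.mul_comm]
          rw [hpow] at h
          omega
        obtain ⟨p', rest', hE', hC'⟩ := ih (t / 2) hcr
        refine ⟨0, (rIdx r).map (· + 1), rfl, ?_⟩
        rw [hE']
        simp only [encN, List.set_cons_zero, List.getD_cons_zero, hpar, List.map_cons]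
        have hhead : ((1 : Nat) : Int) + 1 = 2 := by norm_num
        rw [hhead, rcarry]
        rw [if_pos (by simp)]
        simp only [List.set_cons_zero, List.set_cons_succ, List.getD_cons_succ]
        rw [rcarry_shift rest' p' 0 _ (by norm_num), hC']
        have h1 : (t + 1) % 2 = 0 := by omega
        have h2 : (t + 1) / 2 = t / 2 + 1 := by omega
        simp [h1, h2]

-- carryA (absolute indices, fuel) is rcarry (positions from the right) on the reversed list
theorem carry_corr (n : Nat) (rl : List Nat) (hlt : ∀ q ∈ rl, q < n) :
    ∀ (rest : List Nat) (j : Nat) (rs : List Int) (fuel : Nat),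
    rs.length = n → rl.drop (j + 1) = rest → (hj : j < rl.length) → rest.length + 1 ≤ fuel →
    carryA ((rl.map (fun q => ((n - 1 - q : Nat) : Int))).reverse) fuel (-(j + 1 : Nat)) rs.reverse
      = (rcarry rest rl[j] rs).reverse := by
  intro rest
  induction rest with
  | nil =>
    intro j rs fuel hlen hdrop hj hfuel
    cases fuel with
    | zero => omega
    | succ f =>
      have hjlen : rl.length = j + 1 := by
        have := congrArg List.length hdrop
        simp [List.length_drop] at this
        omega
      have hq : rl[j] < n := hlt _ (List.getElem_mem hj)
      rw [carryA]
      rw [contains_reverse]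
      by_cases hc : rs.contains 2
      · rw [if_pos hc]
        rw [iv_get rl _ j hj]
        dsimp only
        rw [show ((((n - 1 - rl[j] : Nat) : Int)).toNat) = n - 1 - rl[j] from Int.toNat_natCast _]
        have hset : rs.reverse.set (n - 1 - rl[j]) 0 = (rs.set rl[j] 0).reverse := by
          have := set_reverse rs rl[j] (0 : Int) (by omega)
          rw [hlen] at this
          exact this
        rw [hset]
        have hnone : PySem.List.pyGet?
            ((rl.map (fun q => ((n - 1 - q : Nat) : Int))).reverse) (-(j + 1 : Nat) - 1) = none := by
          apply pyGet?_neg_none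
          simp [List.length_reverse, List.length_map]
          omega
        rw [hnone]
        rw [rcarry, if_pos hc]
      · rw [if_neg hc, rcarry, if_neg hc]
  | cons q rest' ih =>
    intro j rs fuel hlen hdrop hj hfuel
    cases fuel with
    | zero => simp at hfuel
    | succ f =>
      have hj1 : j + 1 < rl.length := by
        have := congrArg List.length hdrop
        simp [List.length_drop] at this
        omega
      have hq : rl[j + 1] = q := by
        have h0 : (rl.drop (j + 1))[0]? = some q := by rw [hdrop]; rfl
        rw [List.getElem?_drop] at h0
        exact Option.some.inj ((List.getElem?_eq_getElem hj1).symm.trans (by simpa using h0))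
      have hdrop' : rl.drop (j + 2) = rest' := by
        have h2 : (rl.drop (j + 1)).drop 1 = rest' := by rw [hdrop]; rfl
        rw [List.drop_drop] at h2
        exact h2
      have hjn : rl[j] < n := hlt _ (List.getElem_mem hj)
      have hqn : q < n := by
        rw [← hq]; exact hlt _ (List.getElem_mem hj1)
      rw [carryA]
      rw [contains_reverse]
      by_cases hc : rs.contains 2
      · rw [if_pos hc]
        rw [iv_get rl _ j hj]
        dsimp only
        rw [show ((((n - 1 - rl[j] : Nat) : Int)).toNat) = n - 1 - rl[j] from Int.toNat_natCast _]
        have hset : rs.reverse.set (n - 1 - rl[j]) 0 = (rs.set rl[j] 0).reverse := by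
          have := set_reverse rs rl[j] (0 : Int) (by omega)
          rw [hlen] at this
          exact this
        rw [hset]
        have hk2 : (-(j + 1 : Nat) : Int) - 1 = -(j + 2 : Nat) := by push_cast; ring
        rw [hk2, show ((j + 2 : Nat) : Int) = ((j + 1 + 1 : Nat) : Int) from by push_cast; ring]
        rw [iv_get rl _ (j + 1) hj1, hq]
        dsimp only
        rw [show ((((n - 1 - q : Nat) : Int)).toNat) = n - 1 - q from Int.toNat_natCast _]
        have hlen1 : (rs.set rl[j] 0).length = n := by simp [hlen]
        have hset2 : (rs.set rl[j] 0).reverse.set (n - 1 - q)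
              (((rs.set rl[j] 0).reverse).getD (n - 1 - q) 0 + 1)
            = ((rs.set rl[j] 0).set q (((rs.set rl[j] 0)).getD q 0 + 1)).reverse := by
          have hg := getD_reverse (rs.set rl[j] 0) q (by omega)
          rw [hlen1] at hg
          rw [hg]
          have := set_reverse (rs.set rl[j] 0) q
            (((rs.set rl[j] 0)).getD q 0 + 1) (by omega)
          rw [hlen1] at this
          exact this
        rw [hset2]
        have hrec := ih (j + 1)
          ((rs.set rl[j] 0).set q (((rs.set rl[j] 0)).getD q 0 + 1)) f
          (by simp [hlen]) hdrop' hj1 (by simpa using Nat.le_of_succ_le_succ hfuel)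
        rw [hq] at hrec
        rw [hrec]
        rw [rcarry, if_pos hc]
      · rw [if_neg hc, rcarry, if_neg hc]

theorem stepA_correct (cv : List Bool) (t : Nat) (h : t + 1 < 2 ^ (cv.count true)) :
    stepA ((rIdx cv.reverse).map (fun q => ((cv.length - 1 - q : Nat) : Int))).reverse
      ((encN cv.reverse t).reverse) = (encN cv.reverse (t + 1)).reverse := by
  have hcnt : cv.reverse.count true = cv.count true := List.count_reverse ..
  obtain ⟨p, rest, hE, hC⟩ := rstep_correct cv.reverse t (by rwa [hcnt])
  have hlt : ∀ q ∈ rIdx cv.reverse, q < cv.length := by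
    intro q hq
    have := rIdx_lt cv.reverse q hq
    simpa using this
  have hlenN : (encN cv.reverse t).length = cv.length := by
    rw [length_encN]; simp
  have hj0 : 0 < (rIdx cv.reverse).length := by rw [hE]; simp
  have hp0 : (rIdx cv.reverse)[0] = p := by simp [hE]
  rw [stepA]
  rw [show (-1 : Int) = -(0 + 1 : Nat) from by norm_num]
  rw [iv_get (rIdx cv.reverse) _ 0 hj0]
  dsimp only
  rw [show ((((cv.length - 1 - (rIdx cv.reverse)[0] : Nat) : Int)).toNat)
      = cv.length - 1 - (rIdx cv.reverse)[0] from Int.toNat_natCast _]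
  have hplen : (rIdx cv.reverse)[0] < cv.length := hlt _ (List.getElem_mem hj0)
  have hg := getD_reverse (encN cv.reverse t) (rIdx cv.reverse)[0] (by omega)
  rw [hlenN] at hg
  rw [hg]
  have hs := set_reverse (encN cv.reverse t) (rIdx cv.reverse)[0]
    ((encN cv.reverse t).getD (rIdx cv.reverse)[0] 0 + 1) (by omega)
  rw [hlenN] at hs
  rw [hs]
  have hfuel : rest.length + 1 ≤
      ((rIdx cv.reverse).map (fun q => ((cv.length - 1 - q : Nat) : Int))).reverse.length + 1 := by
    simp [hE]
  have hcc := carry_corr cv.length (rIdx cv.reverse) hlt rest 0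
    ((encN cv.reverse t).set (rIdx cv.reverse)[0]
      ((encN cv.reverse t).getD (rIdx cv.reverse)[0] 0 + 1))
    (((rIdx cv.reverse).map (fun q => ((cv.length - 1 - q : Nat) : Int))).reverse.length + 1)
    (by simp [hlenN]) (by rw [hE]; rfl) hj0 hfuel
  rw [hcc, hp0, hC]

theorem rplace_shift (ds : List Int) : ∀ (ps : List Nat) (x : Int) (s : List Int),
    rplace ds (ps.map (· + 1)) (x :: s) = x :: rplace ds ps s := by
  induction ds with
  | nil => intro ps x s; cases ps <;> rfl
  | cons d ds ih =>
    intro ps x s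
    cases ps with
    | nil => rfl
    | cons p ps => rw [List.map_cons, rplace, rplace, List.set_cons_succ, ih]

-- placing the value's digits (LSB first) onto the valid positions yields its binary spread
theorem rplace_correct (r : List Bool) : ∀ t : Nat, t < 2 ^ (r.count true) →
    rplace (lsbRec t) (rIdx r) (List.replicate r.length 0) = encN r t := by
  induction r with
  | nil =>
    intro t h
    simp at h
    subst h
    simp [lsbRec, rplace, encN]
  | cons b r ih =>
    intro t h
    cases b with
    | false =>
      have hc : t < 2 ^ (r.count true) := by simpa [List.count_cons] using h
      simp only [rIdx, List.length_cons, List.replicate_succ, encN]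
      rw [rplace_shift, ih _ hc]
    | true =>
      rcases Nat.eq_zero_or_pos t with hz | hpos
      · subst hz
        simp [lsbRec, rplace, encN_zero, List.replicate_succ, encN]
      · obtain ⟨v, rfl⟩ : ∃ v, t = v + 1 := ⟨t - 1, by omega⟩
        have hc : (v + 1) / 2 < 2 ^ (r.count true) := by
          have hpow : 2 ^ ((true :: r).count true) = 2 * 2 ^ (r.count true) := by
            simp [List.count_cons, pow_succ, Nat.mul_comm]
          rw [hpow] at h
          omega
        simp only [lsbRec, rIdx, List.length_cons, List.replicate_succ, rplace, encN,
          List.set_cons_zero]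
        rw [rplace_shift, ih _ hc]

theorem rplace_nil (ds : List Int) (s : List Int) : rplace ds [] s = s := by
  cases ds <;> rfl

-- B's pop loop, as rplace on the reversed list
theorem popfold (n : Nat) : ∀ (ds : List Int) (rl : List Nat) (rs : List Int),
    rs.length = n → (∀ q ∈ rl, q < n) →
    (ds.foldl
        (fun (st : List Int × List Int) digito =>
          match PySem.List.pop? st.2 with
          | none => st
          | some (p, rest) => (st.1.set p.toNat digito, rest))
        (rs.reverse, (rl.map (fun q => ((n - 1 - q : Nat) : Int))).reverse)).1
      = (rplace ds rl rs).reverse := by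
  intro ds
  induction ds with
  | nil => intro rl rs _ _; rfl
  | cons d ds ih =>
    intro rl rs hlen hlt
    cases rl with
    | nil =>
      rw [List.foldl_cons]
      have hpop : PySem.List.pop? (([] : List Nat).map
          (fun q => ((n - 1 - q : Nat) : Int))).reverse = none := by rfl
      dsimp only
      rw [hpop]
      rw [rplace_nil]
      have hih := ih [] rs hlen (fun q hq => by simp at hq)
      rw [rplace_nil] at hih
      simpa using hih
    | cons p rl' =>
      rw [List.foldl_cons]
      have hrev : ((p :: rl').map (fun q => ((n - 1 - q : Nat) : Int))).reverse
          = (rl'.map (fun q => ((n - 1 - q : Nat) : Int))).reverse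
            ++ [((n - 1 - p : Nat) : Int)] := by
        simp
      dsimp only
      rw [hrev, PySem.List.pop?_last]
      dsimp only
      have hp : p < n := hlt p (by simp)
      rw [show ((((n - 1 - p : Nat) : Int)).toNat) = n - 1 - p from Int.toNat_natCast _]
      have hs := set_reverse rs p d (by omega)
      rw [hlen] at hs
      rw [hs]
      rw [rplace]
      exact ih rl' (rs.set p d) (by simp [hlen]) (fun q hq => hlt q (by simp [hq]))

theorem altB_eq (cv : List Bool) (v : Int) (h0 : 0 ≤ v)
    (hv : v.toNat < 2 ^ (cv.count true)) :
    soma_binaria_restrita_alt cv v = (encN cv.reverse v.toNat).reverse := by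
  rw [soma_binaria_restrita_alt]
  by_cases hz : v = 0
  · rw [if_pos hz, hz]
    rw [show ((0 : Int)).toNat = 0 from rfl, encN_zero]
    simp
  · rw [if_neg hz]
    dsimp only
    rw [validIdx_eq, binDigits_reverse]
    have hlt : ∀ q ∈ rIdx cv.reverse, q < cv.length := by
      intro q hq
      have := rIdx_lt cv.reverse q hq
      simpa using this
    have hrepl : List.replicate cv.length (0 : Int)
        = (List.replicate cv.length (0 : Int)).reverse := by simp
    rw [hrepl]
    rw [popfold cv.length (lsbRec v.toNat) (rIdx cv.reverse)
      (List.replicate cv.length (0 : Int)) (by simp) hlt]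
    have hc : v.toNat < 2 ^ (cv.reverse.count true) := by
      rwa [List.count_reverse]
    rw [show List.replicate cv.length (0 : Int)
        = List.replicate cv.reverse.length (0 : Int) from by simp]
    rw [rplace_correct cv.reverse v.toNat hc]

-- A's counting loop reaches the binary representation
theorem foldA_eq (cv : List Bool) : ∀ m : Nat, m < 2 ^ (cv.count true) →
    (List.range m).foldl
        (fun soma _ => stepA (((rIdx cv.reverse).map (fun q => ((cv.length - 1 - q : Nat) : Int))).reverse) soma)
        (List.replicate cv.length 0)
      = (encN cv.reverse m).reverse := by
  intro m
  induction m with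
  | zero =>
    intro _
    rw [List.range_zero, List.foldl_nil, encN_zero]
    simp
  | succ m ih =>
    intro h
    rw [List.range_succ, List.foldl_append, List.foldl_cons, List.foldl_nil]
    rw [ih (Nat.lt_of_succ_lt h)]
    exact stepA_correct cv m h

-- ===== VERDICT (by name: the statement is the Claim_ definition above) =====
theorem soma_binaria_restrita_spec : Claim_equal_soma_binaria_restrita := by
  intro cv v _ hpre
  obtain ⟨h0, hlt⟩ := hpre
  unfold Spec_soma_binaria_restrita
  rw [soma_binaria_restrita]
  rw [validIdx_eq]
  have hcast : ((2 : Int) ^ (cv.count true)) = (((2 ^ (cv.count true) : Nat)) : Int) := by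
    push_cast; ring
  have hv : v.toNat < 2 ^ (cv.count true) := by omega
  rw [foldA_eq cv v.toNat hv]
  rw [altB_eq cv v h0 hv]
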